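-- pv_equiv track=rewrite | github.com/TrellixVulnTeam/pulpcore_65US | platform/src/pulp/server/auth/authorization.py | _operations_not_granted_by_roles
-- ===== SOURCE A (Python) =====
-- def _operations_not_granted_by_roles(resource, operations, roles):
--     """
--     Filter a list of operations on a resource, removing the operations that
--     are granted to the resource by any role in a given list of roles
--     @type resource: str
--     @param resource: pulp resource
--     @type operations: list or tuple of int's
--     @param operations: operations pertaining to the resource
--     @type roles: list or tuple of L{pulp.server.db.model.Role} instances
--     @param roles: list of roles
--     @rtype: list of int's
--     @return: list of operations on resource not granted by the roles
--     """
--     culled_ops = operations[:]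
--     for role in roles:
--         permissions = role['permissions']
--         if resource not in permissions:
--             continue
--         for operation in culled_ops[:]:
--             if operation in permissions[resource]:
--                 culled_ops.remove(operation)
--     return culled_ops
-- ===== SOURCE B (Python) =====
-- def _operations_not_granted_by_roles(resource, operations, roles):
--     granted = set()
--     for role in roles:
--         permissions = role['permissions']
--         if resource in permissions:
--             granted.update(permissions[resource])
--     return [op for op in operations if op not in granted]
-- ===== Notes on version B (the rewrite author's own statement) =====
-- stated objective: simpler
-- what changed: B first accumulates one set of all operations granted to the resource by any role, then filters the operations list in a single comprehension, instead of A's per-role nested scan that repeatedly calls list.remove on a shrinking copy.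
import Mathlib
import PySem

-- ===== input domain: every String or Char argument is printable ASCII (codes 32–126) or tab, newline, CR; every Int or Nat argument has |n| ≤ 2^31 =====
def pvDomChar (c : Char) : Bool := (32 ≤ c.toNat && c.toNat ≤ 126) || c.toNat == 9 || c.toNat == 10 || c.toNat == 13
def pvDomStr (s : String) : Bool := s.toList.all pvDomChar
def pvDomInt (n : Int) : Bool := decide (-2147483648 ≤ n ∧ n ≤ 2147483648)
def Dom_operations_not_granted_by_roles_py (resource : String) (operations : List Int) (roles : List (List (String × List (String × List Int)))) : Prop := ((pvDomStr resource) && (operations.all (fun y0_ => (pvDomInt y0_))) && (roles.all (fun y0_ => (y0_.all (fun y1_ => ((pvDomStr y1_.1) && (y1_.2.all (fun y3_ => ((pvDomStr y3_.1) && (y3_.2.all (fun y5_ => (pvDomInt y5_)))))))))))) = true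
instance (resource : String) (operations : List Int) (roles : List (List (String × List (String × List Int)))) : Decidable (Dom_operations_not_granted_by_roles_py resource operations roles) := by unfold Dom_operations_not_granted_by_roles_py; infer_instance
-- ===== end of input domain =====

-- B accumulates one set of all granted operations and then filters the operations list once,
-- instead of A's per-role nested scan with repeated list.remove (simpler decomposition).

-- ===== PORT A =====
-- body of A's inner loop: 'if operation in granted: culled_ops.remove(operation)'
def pvRemoveStep (granted : List Int) (c : List Int) (op : Int) : List Int :=
  if granted.contains op then
    match PySem.List.remove? c op with
    | some c' => c'
    | none => c     -- Python's ValueError branch; never taken by A's loop (see pv_inner_loop)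
  else c

-- literal port of A: culled_ops = operations[:]; for each role look up 'permissions'
-- (KeyError → none, excluded by Pre_), skip if resource absent, else iterate a snapshot
-- of culled_ops and remove the matching operations one by one.
def operations_not_granted_by_roles_py (resource : String) (operations : List Int) (roles : List (List (String × List (String × List Int)))) : List Int :=
  roles.foldl (fun culled role =>
    match (PySem.Dict.mk role).get? "permissions" with
    | none => culled          -- Python raises KeyError here; excluded by Pre_
    | some perms =>
      match (PySem.Dict.mk perms).get? resource with
      | none => culled        -- 'if resource not in permissions: continue'
      | some granted =>
        -- 'for operation in culled_ops[:]: …' — fold over the snapshot, accumulator is the live list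
        List.foldl (pvRemoveStep granted) culled culled) operations

-- ===== PORT B =====
def operations_not_granted_by_roles_py_alt (resource : String) (operations : List Int) (roles : List (List (String × List (String × List Int)))) : List Int :=
  let granted : PySem.Set Int :=
    roles.foldl (fun s role =>
      match (PySem.Dict.mk role).get? "permissions" with
      | none => s             -- Python raises KeyError here; excluded by Pre_
      | some perms =>
        match (PySem.Dict.mk perms).get? resource with
        | none => s
        | some g => PySem.Set.update s g) PySem.Set.empty
  operations.filter (fun op => !(PySem.Set.contains granted op))

-- ===== PRECONDITION & SPEC =====
-- Pre_ excludes exactly the inputs on which the Python A raises KeyError: a role dict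
-- without the key 'permissions' (B's Python raises there too).
def Pre_operations_not_granted_by_roles_py (resource : String) (operations : List Int) (roles : List (List (String × List (String × List Int)))) : Prop :=
  ∀ role ∈ roles, ((PySem.Dict.mk role).get? "permissions").isSome
instance (resource : String) (operations : List Int) (roles : List (List (String × List (String × List Int)))) : Decidable (Pre_operations_not_granted_by_roles_py resource operations roles) := by unfold Pre_operations_not_granted_by_roles_py; infer_instance

def pvWitness_operations_not_granted_by_roles_py : String × List Int × (List (List (String × List (String × List Int)))) :=
  ("repo", [1, 2, 3], [[("permissions", [("repo", [2])])]])

def Spec_operations_not_granted_by_roles_py (resource : String) (operations : List Int) (roles : List (List (String × List (String × List Int)))) (out : List Int) : Prop := out = operations_not_granted_by_roles_py_alt resource operations roles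
instance (resource : String) (operations : List Int) (roles : List (List (String × List (String × List Int)))) (out : List Int) : Decidable (Spec_operations_not_granted_by_roles_py resource operations roles out) := by unfold Spec_operations_not_granted_by_roles_py; infer_instance

-- ===== CLAIM (what is proved, stated in full; the proofs are below) =====
def Claim_equal_operations_not_granted_by_roles_py : Prop := ∀ (resource : String) (operations : List Int) (roles : List (List (String × List (String × List Int)))), Dom_operations_not_granted_by_roles_py resource operations roles → Pre_operations_not_granted_by_roles_py resource operations roles → Spec_operations_not_granted_by_roles_py resource operations roles (operations_not_granted_by_roles_py resource operations roles)

-- ===== LEMMAS AND PROOFS =====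

-- the list of operations a single role grants to the resource ([] when the role has no
-- 'permissions' key or the resource is absent — both ports leave their state unchanged there)
def pvGrant (resource : String) (role : List (String × List (String × List Int))) : List Int :=
  match (PySem.Dict.mk role).get? "permissions" with
  | none => []
  | some perms =>
    match (PySem.Dict.mk perms).get? resource with
    | none => []
    | some g => g

theorem pv_remove?_append_of_not_mem (pre s : List Int) (x : Int) (hx : x ∉ pre) :
    PySem.List.remove? (pre ++ x :: s) x = some (pre ++ s) := by
  induction pre with
  | nil => simp
  | cons a pre ih =>
    have ha : a ≠ x := fun h => hx (h ▸ List.mem_cons_self)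
    rw [List.cons_append, PySem.List.remove?_cons_of_ne _ ha,
      ih (fun h => hx (List.mem_cons_of_mem a h))]
    rfl

-- A's inner removal loop is a filter
theorem pv_inner_loop (g : List Int) :
    ∀ (s pre : List Int), (∀ y ∈ pre, y ∉ g) →
    List.foldl (pvRemoveStep g) (pre ++ s) s = pre ++ s.filter (fun op => !g.contains op) := by
  intro s
  induction s with
  | nil => intro pre _; simp
  | cons x s ih =>
    intro pre hpre
    rw [List.foldl_cons]
    by_cases hx : g.contains x = true
    · have hxg : x ∈ g := by simpa using hx
      have hxpre : x ∉ pre := fun hm => hpre x hm hxg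
      have hstep : pvRemoveStep g (pre ++ x :: s) x = pre ++ s := by
        simp [pvRemoveStep, hxg, pv_remove?_append_of_not_mem pre s x hxpre]
      rw [hstep, ih pre hpre]
      simp [hxg]
    · have hx' : g.contains x = false := by simpa using hx
      have hxg : x ∉ g := by simpa using hx'
      have hstep : pvRemoveStep g (pre ++ x :: s) x = (pre ++ [x]) ++ s := by
        simp [pvRemoveStep, hxg]
      rw [hstep, ih (pre ++ [x]) (by
        intro y hy
        rcases List.mem_append.mp hy with h | h
        · exact hpre y h
        · simpa [List.mem_singleton.mp h] using hx')]
      simp [hxg]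

-- one role-step of A is a filter by that role's grant
theorem pv_stepA (resource : String) (culled : List Int)
    (role : List (String × List (String × List Int))) :
    (match (PySem.Dict.mk role).get? "permissions" with
    | none => culled
    | some perms =>
      match (PySem.Dict.mk perms).get? resource with
      | none => culled
      | some granted => List.foldl (pvRemoveStep granted) culled culled)
    = culled.filter (fun op => !(pvGrant resource role).contains op) := by
  unfold pvGrant
  cases h1 : (PySem.Dict.mk role).get? "permissions" with
  | none => simp
  | some perms =>
    dsimp only
    cases h2 : (PySem.Dict.mk perms).get? resource with
    | none => simp
    | some g =>
      dsimp only
      simpa using pv_inner_loop g culled [] (by simp)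

-- A's outer loop filters by the conjunction of all the grants
theorem pv_foldA (resource : String) :
    ∀ (roles : List (List (String × List (String × List Int)))) (ops : List Int),
    operations_not_granted_by_roles_py resource ops roles
    = ops.filter (fun op => roles.all (fun r => !(pvGrant resource r).contains op)) := by
  intro roles
  induction roles with
  | nil => intro ops; simp [operations_not_granted_by_roles_py]
  | cons r roles ih =>
    intro ops
    simp only [operations_not_granted_by_roles_py] at ih ⊢
    rw [List.foldl_cons, pv_stepA resource ops r, ih, List.filter_filter]
    apply List.filter_congr
    intro op _
    simp [List.all_cons, Bool.and_comm]

-- membership in B's accumulated set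
theorem pv_mem_granted (resource : String) :
    ∀ (roles : List (List (String × List (String × List Int)))) (s : PySem.Set Int) (op : Int),
    op ∈ roles.foldl (fun s role =>
      match (PySem.Dict.mk role).get? "permissions" with
      | none => s
      | some perms =>
        match (PySem.Dict.mk perms).get? resource with
        | none => s
        | some g => PySem.Set.update s g) s
    ↔ op ∈ s ∨ ∃ r ∈ roles, op ∈ pvGrant resource r := by
  intro roles
  induction roles with
  | nil => intro s op; simp
  | cons r roles ih =>
    intro s op
    rw [List.foldl_cons, ih]
    cases h1 : (PySem.Dict.mk r).get? "permissions" with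
    | none =>
      dsimp only
      simp only [List.mem_cons]
      constructor
      · rintro (h | h)
        · exact Or.inl h
        · exact Or.inr (by rcases h with ⟨x, hx, h⟩; exact ⟨x, Or.inr hx, h⟩)
      · rintro (h | ⟨x, hx | hx, h⟩)
        · exact Or.inl h
        · subst hx; simp [pvGrant, h1] at h
        · exact Or.inr ⟨x, hx, h⟩
    | some perms =>
      dsimp only
      cases h2 : (PySem.Dict.mk perms).get? resource with
      | none =>
        dsimp only
        simp only [List.mem_cons]
        constructor
        · rintro (h | h)
          · exact Or.inl h
          · exact Or.inr (by rcases h with ⟨x, hx, h⟩; exact ⟨x, Or.inr hx, h⟩)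
        · rintro (h | ⟨x, hx | hx, h⟩)
          · exact Or.inl h
          · subst hx; simp [pvGrant, h1, h2] at h
          · exact Or.inr ⟨x, hx, h⟩
      | some g =>
        dsimp only
        rw [PySem.Set.mem_update]
        have hg : pvGrant resource r = g := by simp [pvGrant, h1, h2]
        simp only [List.mem_cons]
        constructor
        · rintro ((h | h) | ⟨x, hx, hxm⟩)
          · exact Or.inl h
          · exact Or.inr ⟨r, Or.inl rfl, by rw [hg]; exact h⟩
          · exact Or.inr ⟨x, Or.inr hx, hxm⟩
        · rintro (h | ⟨x, hx | hx, h⟩)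
          · exact Or.inl (Or.inl h)
          · subst hx; rw [hg] at h; exact Or.inl (Or.inr h)
          · exact Or.inr ⟨x, hx, h⟩

-- ===== VERDICT (by name: the statement is the Claim_ definition above) =====
theorem operations_not_granted_by_roles_py_spec : Claim_equal_operations_not_granted_by_roles_py := by
  intro resource operations roles _ _
  unfold Spec_operations_not_granted_by_roles_py operations_not_granted_by_roles_py_alt
  dsimp only
  rw [pv_foldA]
  apply List.filter_congr
  intro op _
  rw [Bool.eq_iff_iff]
  simp only [List.all_eq_true, Bool.not_eq_true', PySem.Set.contains_eq_listContains,
    List.contains_eq_mem, decide_eq_false_iff_not, pv_mem_granted]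
  constructor
  · intro h
    rintro (h' | ⟨r, hr, hop⟩)
    · exact absurd h' (by simp [PySem.Set.empty])
    · exact h r hr hop
  · intro h r hr hop
    exact h (Or.inr ⟨r, hr, hop⟩)
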